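-- pv_equiv track=rewrite | github.com/hustyep/Titan | src/rune/rune.py | polygon_direction
-- ===== SOURCE A (Python) =====
-- def polygon_direction(polygon):
--     n_points = len(polygon)
--     direct = None
--     for i, vertex in enumerate(polygon):
--         j = (i + 1) % n_points
--         p1 = vertex[0]
--         p2 = polygon[j][0]
--         d = (p2[0] - p1[0]) ** 2 + (p2[1] - p1[1]) ** 2
--
--         if abs(p1[0] - p2[0]) <= 1 and d >= 9:
--             direct = 'left'
--             p = p2 if p1[0] < p2[0] else p1
--             for i, vertex in enumerate(polygon):
--                 if vertex[0][0] > p[0]: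
--                     direct = None
--                     break
--             if direct:
--                 break
--             direct = 'right'
--             p = p2 if p1[0] > p2[0] else p1
--             for i, vertex in enumerate(polygon):
--                 if vertex[0][0] < p[0]:
--                     direct = None
--                     break
--             if direct:
--                 break
--         elif abs(p1[1] - p2[1]) <= 1 and d >= 9:
--             direct = 'down'
--             p = p1 if p1[1] < p2[1] else p2
--             for i, vertex in enumerate(polygon):
--                 if vertex[0][1] < p[1]:
--                     direct = None
--                     break
--             if direct:
--                 break
--             direct = 'up'
--             p = p2 if p1[1] < p2[1] else p1
--             for i, vertex in enumerate(polygon):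
--                 if vertex[0][1] > p[1]:
--                     direct = None
--                     break
--             if direct:
--                 break
--
--
--     return direct
-- ===== SOURCE B (Python) =====
-- def polygon_direction(polygon):
--     if not polygon:
--         return None
--     xs = [v[0][0] for v in polygon]
--     ys = [v[0][1] for v in polygon]
--     min_x, max_x = min(xs), max(xs)
--     min_y, max_y = min(ys), max(ys)
--     n = len(polygon)
--     for i in range(n):
--         x1, y1 = xs[i], ys[i]
--         j = (i + 1) % n
--         x2, y2 = xs[j], ys[j]
--         d = (x2 - x1) ** 2 + (y2 - y1) ** 2
--         if d < 9:
--             continue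
--         if abs(x1 - x2) <= 1:
--             if max(x1, x2) >= max_x:
--                 return 'left'
--             if min(x1, x2) <= min_x:
--                 return 'right'
--         elif abs(y1 - y2) <= 1:
--             if min(y1, y2) <= min_y:
--                 return 'down'
--             if max(y1, y2) >= max_y:
--                 return 'up'
--     return None
-- ===== Notes on version B (the rewrite author's own statement) =====
-- stated objective: alternative
-- what changed: B precomputes the polygon's min/max x and y coordinates once and replaces A's per-edge inner validation scan with a direct comparison of the edge's endpoints against those extremes.
-- outside the precondition, e.g. on polygon_direction([[[0, 0]], [[0, 10]], [[5]]]): A returns 'right', B raises IndexError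
import Mathlib
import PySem

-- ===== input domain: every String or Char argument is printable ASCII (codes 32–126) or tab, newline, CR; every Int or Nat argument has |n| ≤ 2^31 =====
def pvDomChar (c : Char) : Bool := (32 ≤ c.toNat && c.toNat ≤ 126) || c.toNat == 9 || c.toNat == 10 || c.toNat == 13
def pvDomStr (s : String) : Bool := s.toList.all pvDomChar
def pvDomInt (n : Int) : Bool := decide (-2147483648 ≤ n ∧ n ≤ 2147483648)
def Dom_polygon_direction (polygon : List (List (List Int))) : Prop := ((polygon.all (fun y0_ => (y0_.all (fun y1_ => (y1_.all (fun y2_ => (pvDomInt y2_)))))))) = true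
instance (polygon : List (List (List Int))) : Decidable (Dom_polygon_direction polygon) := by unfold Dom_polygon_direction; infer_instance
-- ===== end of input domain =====

-- B replaces A's inner validation scan per qualifying edge by comparisons against
-- min/max x,y extremes precomputed once (a different algorithm, not measured faster).

-- ===== PORT A =====
-- vertex[0][0] / vertex[0][1]; exact on Pre_ (vertex nonempty, point has ≥ 2 coords),
-- where Python's indexing never raises.
def pvX (v : List (List Int)) : Int := (v.headD []).getD 0 0
def pvY (v : List (List Int)) : Int := (v.headD []).getD 1 0

-- A's four inner early-break scans ("for i, vertex in enumerate(polygon): if …: direct = None; break")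
def aAllLeX (px : Int) : List (List (List Int)) → Bool
  | [] => true
  | v :: rest => if pvX v > px then false else aAllLeX px rest
def aAllGeX (px : Int) : List (List (List Int)) → Bool
  | [] => true
  | v :: rest => if pvX v < px then false else aAllGeX px rest
def aAllGeY (py : Int) : List (List (List Int)) → Bool
  | [] => true
  | v :: rest => if pvY v < py then false else aAllGeY py rest
def aAllLeY (py : Int) : List (List (List Int)) → Bool
  | [] => true
  | v :: rest => if pvY v > py then false else aAllLeY py rest

-- A's outer loop, recursing on the remaining suffix of the polygon with the current index i.
-- polygon[(i+1) % n] is in range whenever the loop runs, so getD is exact there.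
def aLoop (polygon : List (List (List Int))) : List (List (List Int)) → Nat → Option String
  | [], _ => none
  | vertex :: rest, i =>
      let j := (i + 1) % polygon.length
      let p1x := pvX vertex
      let p1y := pvY vertex
      let pj := polygon.getD j []
      let p2x := pvX pj
      let p2y := pvY pj
      let d := (p2x - p1x) ^ 2 + (p2y - p1y) ^ 2
      if |p1x - p2x| ≤ 1 ∧ d ≥ 9 then
        if aAllLeX (if p1x < p2x then p2x else p1x) polygon then some "left"
        else if aAllGeX (if p1x > p2x then p2x else p1x) polygon then some "right"
        else aLoop polygon rest (i + 1)
      else if |p1y - p2y| ≤ 1 ∧ d ≥ 9 then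
        if aAllGeY (if p1y < p2y then p1y else p2y) polygon then some "down"
        else if aAllLeY (if p1y < p2y then p2y else p1y) polygon then some "up"
        else aLoop polygon rest (i + 1)
      else aLoop polygon rest (i + 1)

def polygon_direction (polygon : List (List (List Int))) : Option String :=
  aLoop polygon polygon 0

-- ===== PORT B =====
-- coordinate lists xs = [v[0][0] for v in polygon], ys = [v[0][1] for v in polygon];
-- exact on Pre_ as above.
def bXs (polygon : List (List (List Int))) : List Int :=
  polygon.map (fun v => (v.headD []).getD 0 0)
def bYs (polygon : List (List (List Int))) : List Int :=
  polygon.map (fun v => (v.headD []).getD 1 0)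

-- B's single pass over the edge indices, comparing against the precomputed extremes.
def bLoop (xs ys : List Int) (minX maxX minY maxY : Int) (n : Nat) : List Nat → Option String
  | [] => none
  | i :: rest =>
      let x1 := xs.getD i 0
      let y1 := ys.getD i 0
      let j := (i + 1) % n
      let x2 := xs.getD j 0
      let y2 := ys.getD j 0
      let d := (x2 - x1) ^ 2 + (y2 - y1) ^ 2
      if d < 9 then bLoop xs ys minX maxX minY maxY n rest
      else if |x1 - x2| ≤ 1 then
        if max x1 x2 ≥ maxX then some "left"
        else if min x1 x2 ≤ minX then some "right"
        else bLoop xs ys minX maxX minY maxY n rest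
      else if |y1 - y2| ≤ 1 then
        if min y1 y2 ≤ minY then some "down"
        else if max y1 y2 ≥ maxY then some "up"
        else bLoop xs ys minX maxX minY maxY n rest
      else bLoop xs ys minX maxX minY maxY n rest

def polygon_direction_alt (polygon : List (List (List Int))) : Option String :=
  match polygon with
  | [] => none
  | v :: vs =>
      let xs := bXs (v :: vs)
      let ys := bYs (v :: vs)
      let x0 := (v.headD []).getD 0 0
      let y0 := (v.headD []).getD 1 0
      let minX := (bXs vs).foldl min x0
      let maxX := (bXs vs).foldl max x0
      let minY := (bYs vs).foldl min y0
      let maxY := (bYs vs).foldl max y0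
      let n := (v :: vs).length
      bLoop xs ys minX maxX minY maxY n (List.range n)

-- ===== PRECONDITION & SPEC =====
-- Pre_ excludes polygons containing an empty vertex or a point with fewer than two
-- coordinates: Python A's indexing raises IndexError on almost all of them (and B raises
-- up front); on the rare such inputs where A still returns (an early edge check succeeds
-- using only the coordinates that exist), B's list comprehension raises instead.
def Pre_polygon_direction (polygon : List (List (List Int))) : Prop :=
  ∀ v ∈ polygon, v ≠ [] ∧ 2 ≤ (v.headD []).length
instance (polygon : List (List (List Int))) : Decidable (Pre_polygon_direction polygon) := by
  unfold Pre_polygon_direction; infer_instance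

def pvWitness_polygon_direction : List (List (List Int)) :=
  [[[0, 0]], [[0, 10]], [[5, 5]]]

def Spec_polygon_direction (polygon : List (List (List Int))) (out : Option String) : Prop := out = polygon_direction_alt polygon
instance (polygon : List (List (List Int))) (out : Option String) : Decidable (Spec_polygon_direction polygon out) := by unfold Spec_polygon_direction; infer_instance

-- ===== CLAIM (what is proved, stated in full; the proofs are below) =====
def Claim_equal_polygon_direction : Prop := ∀ (polygon : List (List (List Int))), Dom_polygon_direction polygon → Pre_polygon_direction polygon → Spec_polygon_direction polygon (polygon_direction polygon)

-- ===== LEMMAS AND PROOFS =====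

theorem aAllLeX_iff (px : Int) (l : List (List (List Int))) :
    aAllLeX px l = true ↔ ∀ v ∈ l, pvX v ≤ px := by
  induction l with
  | nil => simp [aAllLeX]
  | cons v rest ih =>
      simp only [aAllLeX, List.mem_cons]
      split_ifs with h
      · constructor
        · intro hc; cases hc
        · intro hall; exact absurd (hall v (Or.inl rfl)) (by omega)
      · rw [ih]
        constructor
        · intro hall w hw
          rcases hw with rfl | hw
          · omega
          · exact hall w hw
        · intro hall w hw; exact hall w (Or.inr hw)

theorem aAllGeX_iff (px : Int) (l : List (List (List Int))) :
    aAllGeX px l = true ↔ ∀ v ∈ l, px ≤ pvX v := by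
  induction l with
  | nil => simp [aAllGeX]
  | cons v rest ih =>
      simp only [aAllGeX, List.mem_cons]
      split_ifs with h
      · constructor
        · intro hc; cases hc
        · intro hall; exact absurd (hall v (Or.inl rfl)) (by omega)
      · rw [ih]
        constructor
        · intro hall w hw
          rcases hw with rfl | hw
          · omega
          · exact hall w hw
        · intro hall w hw; exact hall w (Or.inr hw)

theorem aAllGeY_iff (py : Int) (l : List (List (List Int))) :
    aAllGeY py l = true ↔ ∀ v ∈ l, py ≤ pvY v := by
  induction l with
  | nil => simp [aAllGeY]
  | cons v rest ih =>
      simp only [aAllGeY, List.mem_cons]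
      split_ifs with h
      · constructor
        · intro hc; cases hc
        · intro hall; exact absurd (hall v (Or.inl rfl)) (by omega)
      · rw [ih]
        constructor
        · intro hall w hw
          rcases hw with rfl | hw
          · omega
          · exact hall w hw
        · intro hall w hw; exact hall w (Or.inr hw)

theorem aAllLeY_iff (py : Int) (l : List (List (List Int))) :
    aAllLeY py l = true ↔ ∀ v ∈ l, pvY v ≤ py := by
  induction l with
  | nil => simp [aAllLeY]
  | cons v rest ih =>
      simp only [aAllLeY, List.mem_cons]
      split_ifs with h
      · constructor
        · intro hc; cases hc
        · intro hall; exact absurd (hall v (Or.inl rfl)) (by omega)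
      · rw [ih]
        constructor
        · intro hall w hw
          rcases hw with rfl | hw
          · omega
          · exact hall w hw
        · intro hall w hw; exact hall w (Or.inr hw)

-- fold max over a list bounds exactly all its elements and the seed
theorem foldl_max_le_iff (t : List Int) (a b : Int) :
    t.foldl max a ≤ b ↔ a ≤ b ∧ ∀ y ∈ t, y ≤ b := by
  induction t generalizing a with
  | nil => simp
  | cons x xs ih =>
      simp only [List.foldl_cons, List.mem_cons, ih]
      constructor
      · rintro ⟨h1, h2⟩
        refine ⟨le_trans (le_max_left _ _) h1, ?_⟩
        intro y hy
        rcases hy with rfl | hy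
        · exact le_trans (le_max_right _ _) h1
        · exact h2 y hy
      · rintro ⟨h1, h2⟩
        exact ⟨max_le h1 (h2 x (Or.inl rfl)), fun y hy => h2 y (Or.inr hy)⟩

theorem le_foldl_min_iff (t : List Int) (a b : Int) :
    b ≤ t.foldl min a ↔ b ≤ a ∧ ∀ y ∈ t, b ≤ y := by
  induction t generalizing a with
  | nil => simp
  | cons x xs ih =>
      simp only [List.foldl_cons, List.mem_cons, ih]
      constructor
      · rintro ⟨h1, h2⟩
        refine ⟨le_trans h1 (min_le_left _ _), ?_⟩
        intro y hy
        rcases hy with rfl | hy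
        · exact le_trans h1 (min_le_right _ _)
        · exact h2 y hy
      · rintro ⟨h1, h2⟩
        exact ⟨le_min h1 (h2 x (Or.inl rfl)), fun y hy => h2 y (Or.inr hy)⟩

theorem bXs_getD (polygon : List (List (List Int))) (i : Nat) (hi : i < polygon.length) :
    (bXs polygon).getD i 0 = pvX (polygon.getD i []) := by
  simp [bXs, pvX, List.getD, List.getElem?_map, List.getElem?_eq_getElem hi]

theorem bYs_getD (polygon : List (List (List Int))) (i : Nat) (hi : i < polygon.length) :
    (bYs polygon).getD i 0 = pvY (polygon.getD i []) := by
  simp [bYs, pvY, List.getD, List.getElem?_map, List.getElem?_eq_getElem hi]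

-- drop of a range: the tail of the index stream
theorem range_drop_cons (n i : Nat) (h : i < n) :
    (List.range n).drop i = i :: (List.range n).drop (i + 1) := by
  rw [List.drop_eq_getElem_cons (by simpa using h)]
  simp

-- the main loop correspondence
theorem loop_eq (v : List (List Int)) (vs : List (List (List Int))) (i : Nat)
    (hle : i ≤ (v :: vs).length) :
    aLoop (v :: vs) ((v :: vs).drop i) i =
      bLoop (bXs (v :: vs)) (bYs (v :: vs))
        ((bXs vs).foldl min (pvX v)) ((bXs vs).foldl max (pvX v))
        ((bYs vs).foldl min (pvY v)) ((bYs vs).foldl max (pvY v))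
        (v :: vs).length ((List.range (v :: vs).length).drop i) := by
  set polygon := v :: vs with hpoly
  set n := polygon.length with hn
  induction hfuel : n - i generalizing i with
  | zero =>
      have hi : i = n := by omega
      subst hi
      have h1 : polygon.drop n = [] := List.drop_eq_nil_of_le (by omega)
      have h2 : (List.range n).drop n = [] := List.drop_eq_nil_of_le (by simp)
      rw [h1, h2]
      rfl
  | succ k ih =>
      have hi : i < n := by omega
      -- current vertex
      obtain ⟨vertex, hvertex⟩ : ∃ w, polygon.getD i [] = w := ⟨_, rfl⟩
      have hdrop : polygon.drop i = vertex :: polygon.drop (i + 1) := by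
        have := List.drop_eq_getElem_cons (l := polygon) (by simpa [hn] using hi)
        rw [this]; simp [List.getD, List.getElem?_eq_getElem (show i < polygon.length by omega), ← hvertex]
      have hrdrop := range_drop_cons n i hi
      have hj : (i + 1) % n < n := Nat.mod_lt _ (by omega)
      have hxi : (bXs polygon).getD i 0 = pvX vertex := by
        rw [bXs_getD polygon i (by simpa [hn] using hi), hvertex]
      have hyi : (bYs polygon).getD i 0 = pvY vertex := by
        rw [bYs_getD polygon i (by simpa [hn] using hi), hvertex]
      have hxj : (bXs polygon).getD ((i + 1) % n) 0 = pvX (polygon.getD ((i + 1) % n) []) :=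
        bXs_getD polygon _ (by simpa [hn] using hj)
      have hyj : (bYs polygon).getD ((i + 1) % n) 0 = pvY (polygon.getD ((i + 1) % n) []) :=
        bYs_getD polygon _ (by simpa [hn] using hj)
      rw [hdrop, hrdrop]
      rw [aLoop, bLoop]
      simp only [← hn, hxi, hyi, hxj, hyj]
      set p1x := pvX vertex
      set p1y := pvY vertex
      set p2x := pvX (polygon.getD ((i + 1) % n) [])
      set p2y := pvY (polygon.getD ((i + 1) % n) [])
      set d := (p2x - p1x) ^ 2 + (p2y - p1y) ^ 2 with hd
      have ihnext : aLoop polygon (polygon.drop (i + 1)) (i + 1) =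
          bLoop (bXs polygon) (bYs polygon)
            ((bXs vs).foldl min (pvX v)) ((bXs vs).foldl max (pvX v))
            ((bYs vs).foldl min (pvY v)) ((bYs vs).foldl max (pvY v))
            n ((List.range n).drop (i + 1)) :=
        ih (i + 1) (by omega) (by omega)
      -- characterize the four scans via the extremes
      have hmaxX : ∀ b : Int, (aAllLeX b polygon = true) ↔ ((bXs vs).foldl max (pvX v) ≤ b) := by
        intro b
        rw [aAllLeX_iff, foldl_max_le_iff]
        constructor
        · intro h
          refine ⟨h v (by simp [hpoly]), ?_⟩
          intro y hy
          simp only [bXs, List.mem_map] at hy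
          obtain ⟨w, hw, rfl⟩ := hy
          exact h w (by simp [hpoly, hw])
        · rintro ⟨h1, h2⟩ w hw
          rcases (by simpa [hpoly] using hw : w = v ∨ w ∈ vs) with rfl | hw'
          · exact h1
          · exact h2 (pvX w) (by simp [bXs, pvX]; exact ⟨w, hw', rfl⟩)
      have hminX : ∀ b : Int, (aAllGeX b polygon = true) ↔ (b ≤ (bXs vs).foldl min (pvX v)) := by
        intro b
        rw [aAllGeX_iff, le_foldl_min_iff]
        constructor
        · intro h
          refine ⟨h v (by simp [hpoly]), ?_⟩
          intro y hy
          simp only [bXs, List.mem_map] at hy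
          obtain ⟨w, hw, rfl⟩ := hy
          exact h w (by simp [hpoly, hw])
        · rintro ⟨h1, h2⟩ w hw
          rcases (by simpa [hpoly] using hw : w = v ∨ w ∈ vs) with rfl | hw'
          · exact h1
          · exact h2 (pvX w) (by simp [bXs, pvX]; exact ⟨w, hw', rfl⟩)
      have hminY : ∀ b : Int, (aAllGeY b polygon = true) ↔ (b ≤ (bYs vs).foldl min (pvY v)) := by
        intro b
        rw [aAllGeY_iff, le_foldl_min_iff]
        constructor
        · intro h
          refine ⟨h v (by simp [hpoly]), ?_⟩
          intro y hy
          simp only [bYs, List.mem_map] at hy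
          obtain ⟨w, hw, rfl⟩ := hy
          exact h w (by simp [hpoly, hw])
        · rintro ⟨h1, h2⟩ w hw
          rcases (by simpa [hpoly] using hw : w = v ∨ w ∈ vs) with rfl | hw'
          · exact h1
          · exact h2 (pvY w) (by simp [bYs, pvY]; exact ⟨w, hw', rfl⟩)
      have hmaxY : ∀ b : Int, (aAllLeY b polygon = true) ↔ ((bYs vs).foldl max (pvY v) ≤ b) := by
        intro b
        rw [aAllLeY_iff, foldl_max_le_iff]
        constructor
        · intro h
          refine ⟨h v (by simp [hpoly]), ?_⟩
          intro y hy
          simp only [bYs, List.mem_map] at hy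
          obtain ⟨w, hw, rfl⟩ := hy
          exact h w (by simp [hpoly, hw])
        · rintro ⟨h1, h2⟩ w hw
          rcases (by simpa [hpoly] using hw : w = v ∨ w ∈ vs) with rfl | hw'
          · exact h1
          · exact h2 (pvY w) (by simp [bYs, pvY]; exact ⟨w, hw', rfl⟩)
      by_cases hd9 : d ≥ 9
      · have hnd : ¬ d < 9 := by omega
        by_cases hdx : |p1x - p2x| ≤ 1
        · have hmx : (if p1x < p2x then p2x else p1x) = max p1x p2x := by
            rcases le_or_gt p1x p2x with h | h
            · simp [max_eq_right h]; omega
            · simp [max_eq_left (le_of_lt h)]; omega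
          have hmn : (if p1x > p2x then p2x else p1x) = min p1x p2x := by
            rcases le_or_gt p1x p2x with h | h
            · simp [min_eq_left h]; omega
            · simp [min_eq_right (le_of_lt h)]; omega
          simp only [if_pos (And.intro hdx hd9), if_neg hnd, if_pos hdx, hmx, hmn]
          by_cases hL : (bXs vs).foldl max (pvX v) ≤ max p1x p2x
          · rw [if_pos ((hmaxX _).mpr hL), if_pos (by omega : max p1x p2x ≥ (bXs vs).foldl max (pvX v))]
          · rw [if_neg (by rw [hmaxX]; exact hL), if_neg (by omega : ¬ max p1x p2x ≥ (bXs vs).foldl max (pvX v))]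
            by_cases hR : min p1x p2x ≤ (bXs vs).foldl min (pvX v)
            · rw [if_pos ((hminX _).mpr hR), if_pos hR]
            · rw [if_neg (by rw [hminX]; exact hR), if_neg hR]
              exact ihnext
        · by_cases hdy : |p1y - p2y| ≤ 1
          · have hmn : (if p1y < p2y then p1y else p2y) = min p1y p2y := by
              rcases le_or_gt p1y p2y with h | h
              · simp [min_eq_left h]; omega
              · simp [min_eq_right (le_of_lt h)]; omega
            have hmx : (if p1y < p2y then p2y else p1y) = max p1y p2y := by
              rcases le_or_gt p1y p2y with h | h
              · simp [max_eq_right h]; omega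
              · simp [max_eq_left (le_of_lt h)]; omega
            simp only [if_neg (fun hc : |p1x - p2x| ≤ 1 ∧ d ≥ 9 => hdx hc.1), if_pos (And.intro hdy hd9),
              if_neg hnd, if_neg hdx, if_pos hdy, hmn, hmx]
            by_cases hD : min p1y p2y ≤ (bYs vs).foldl min (pvY v)
            · rw [if_pos ((hminY _).mpr hD), if_pos hD]
            · rw [if_neg (by rw [hminY]; exact hD), if_neg hD]
              by_cases hU : (bYs vs).foldl max (pvY v) ≤ max p1y p2y
              · rw [if_pos ((hmaxY _).mpr hU), if_pos (by omega : max p1y p2y ≥ (bYs vs).foldl max (pvY v))]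
              · rw [if_neg (by rw [hmaxY]; exact hU), if_neg (by omega : ¬ max p1y p2y ≥ (bYs vs).foldl max (pvY v))]
                exact ihnext
          · simp only [if_neg (fun hc : |p1x - p2x| ≤ 1 ∧ d ≥ 9 => hdx hc.1), if_neg (fun hc : |p1y - p2y| ≤ 1 ∧ d ≥ 9 => hdy hc.1),
              if_neg hnd, if_neg hdx, if_neg hdy]
            exact ihnext
      · -- d < 9: no branch of A fires, B skips immediately
        simp only [if_neg (fun hc : |p1x - p2x| ≤ 1 ∧ d ≥ 9 => absurd hc.2 (by omega)),
          if_neg (fun hc : |p1y - p2y| ≤ 1 ∧ d ≥ 9 => absurd hc.2 (by omega)),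
          if_pos (by omega : d < 9)]
        exact ihnext

-- ===== VERDICT (by name: the statement is the Claim_ definition above) =====
theorem polygon_direction_spec : Claim_equal_polygon_direction := by
  intro polygon _hdom _hpre
  unfold Spec_polygon_direction polygon_direction polygon_direction_alt
  cases polygon with
  | nil => simp [aLoop]
  | cons v vs =>
      have h := loop_eq v vs 0 (Nat.zero_le _)
      simpa [pvX, pvY] using h
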